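-- pv_equiv track=rewrite | github.com/Ishan-1/Summer_Project | code/algos/cmine.py | self_join
-- ===== SOURCE A (Python) =====
-- def self_join(patterns,flist):
--     new_patterns=[]
--     for i in range(0,len(patterns)):
--         for j in range(i+1,len(patterns)):
--             if patterns[i][:-1]==patterns[j][:-1]:
--                 l1=patterns[i][-1]
--                 l2=patterns[j][-1]
--                 if flist[l1]>=flist[l2]:
--                     new_patterns.append(patterns[i]+(l2,))
--                 else:
--                     new_patterns.append(patterns[j]+(l1,))
--     return new_patterns
-- ===== SOURCE B (Python) =====
-- def self_join(patterns, flist):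
--     # Group patterns by prefix once; join only within a pattern's own bucket,
--     # walking the bucket's later members (which appear in original order), so
--     # the output comes out already in A's (i, j) order without any sort.
--     buckets = {}
--     slots = []
--     for p in patterns:
--         key = p[:-1]
--         b = buckets.setdefault(key, [])
--         slots.append((key, len(b)))
--         b.append(p)
--     out = []
--     for p, (key, pos) in zip(patterns, slots):
--         for q in buckets[key][pos + 1:]:
--             l1 = p[-1]
--             l2 = q[-1]
--             if flist[l1] >= flist[l2]:
--                 out.append(p + (l2,))
--             else:
--                 out.append(q + (l1,))
--     return out
-- ===== Notes on version B (the rewrite author's own statement) =====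
-- stated objective: faster
-- what changed: Instead of testing every pair (i,j) for a shared prefix, B groups the patterns by prefix in one dict pass and joins each pattern only with the later members of its own bucket, producing the output directly in A's (i,j) order.
import Mathlib
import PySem

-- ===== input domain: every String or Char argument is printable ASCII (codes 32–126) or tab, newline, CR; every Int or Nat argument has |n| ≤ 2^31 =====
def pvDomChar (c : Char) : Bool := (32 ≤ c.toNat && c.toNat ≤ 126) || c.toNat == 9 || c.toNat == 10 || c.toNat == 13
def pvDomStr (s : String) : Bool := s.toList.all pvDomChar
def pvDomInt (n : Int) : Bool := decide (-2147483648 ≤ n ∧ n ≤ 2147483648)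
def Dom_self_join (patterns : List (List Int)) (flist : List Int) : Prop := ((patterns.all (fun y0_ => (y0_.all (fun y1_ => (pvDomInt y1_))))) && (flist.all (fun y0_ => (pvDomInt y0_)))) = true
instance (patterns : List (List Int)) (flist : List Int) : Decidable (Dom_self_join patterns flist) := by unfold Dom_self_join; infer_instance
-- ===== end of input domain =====

-- B replaces A's all-pairs prefix test by one dict pass grouping patterns by prefix,
-- joining each pattern only with the later members of its own bucket (objective: faster).

-- ===== PORT A =====
def self_join (patterns : List (List Int)) (flist : List Int) : List (List Int) :=
  (PySem.List.pyRange 0 (patterns.length : Int) 1).foldl (fun new_patterns i =>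
    (PySem.List.pyRange (i + 1) (patterns.length : Int) 1).foldl (fun new_patterns j =>
      if PySem.List.slice (PySem.List.pyGetD patterns i []) none (some (-1))
         = PySem.List.slice (PySem.List.pyGetD patterns j []) none (some (-1)) then
        let l1 := PySem.List.pyGetD (PySem.List.pyGetD patterns i []) (-1) 0
        let l2 := PySem.List.pyGetD (PySem.List.pyGetD patterns j []) (-1) 0
        if PySem.List.pyGetD flist l1 0 ≥ PySem.List.pyGetD flist l2 0 then
          new_patterns ++ [PySem.List.pyGetD patterns i [] ++ [l2]]
        else
          new_patterns ++ [PySem.List.pyGetD patterns j [] ++ [l1]]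
      else new_patterns) new_patterns) []

-- ===== PORT B =====
-- body of B's first loop: key = p[:-1]; b = buckets.setdefault(key, []); slots.append((key, len(b))); b.append(p)
def stepB (st : PySem.Dict (List Int) (List (List Int)) × List ((List Int) × Int))
    (p : List Int) : PySem.Dict (List Int) (List (List Int)) × List ((List Int) × Int) :=
  let key := PySem.List.slice p none (some (-1))
  let b := st.1.getD key []
  (st.1.insert key (b ++ [p]), st.2 ++ [(key, (b.length : Int))])

def self_join_alt (patterns : List (List Int)) (flist : List Int) : List (List Int) :=
  let st := patterns.foldl stepB (PySem.Dict.empty, [])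
  let buckets := st.1
  let slots := st.2
  -- second pass: for p,(key,pos) in zip(patterns,slots): for q in buckets[key][pos+1:]
  (patterns.zip slots).foldl (fun out pk =>
    (PySem.List.slice (buckets.getD pk.2.1 []) (some (pk.2.2 + 1)) none).foldl (fun out q =>
      let l1 := PySem.List.pyGetD pk.1 (-1) 0
      let l2 := PySem.List.pyGetD q (-1) 0
      if PySem.List.pyGetD flist l1 0 ≥ PySem.List.pyGetD flist l2 0 then
        out ++ [pk.1 ++ [l2]]
      else
        out ++ [q ++ [l1]]) out) []

-- ===== PRECONDITION & SPEC =====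
-- Pre_ excludes exactly the inputs where the Python raises: a pair i<j of patterns with equal
-- prefixes whose last element is missing (IndexError on p[-1]) or not a valid index into flist.
def pvLastOk (flist : List Int) (p : List Int) : Bool :=
  !p.isEmpty && decide (-(flist.length : Int) ≤ PySem.List.pyGetD p (-1) 0)
    && decide (PySem.List.pyGetD p (-1) 0 < (flist.length : Int))
def Pre_self_join (patterns : List (List Int)) (flist : List Int) : Prop :=
  ((List.range patterns.length).all fun i =>
    (List.range patterns.length).all fun j =>
      !(decide (i < j) && (patterns.getD i []).dropLast == (patterns.getD j []).dropLast)
        || (pvLastOk flist (patterns.getD i []) && pvLastOk flist (patterns.getD j []))) = true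
instance (patterns : List (List Int)) (flist : List Int) : Decidable (Pre_self_join patterns flist) := by
  unfold Pre_self_join; infer_instance

def pvWitness_self_join : List (List Int) × List Int := ([[0, 1], [0, 2], [1, 0]], [5, 3, 7])

def Spec_self_join (patterns : List (List Int)) (flist : List Int) (out : List (List Int)) : Prop := out = self_join_alt patterns flist
instance (patterns : List (List Int)) (flist : List Int) (out : List (List Int)) : Decidable (Spec_self_join patterns flist out) := by unfold Spec_self_join; infer_instance

-- ===== CLAIM (what is proved, stated in full; the proofs are below) =====
def Claim_equal_self_join : Prop := ∀ (patterns : List (List Int)) (flist : List Int), Dom_self_join patterns flist → Pre_self_join patterns flist → Spec_self_join patterns flist (self_join patterns flist)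

-- ===== LEMMAS AND PROOFS =====

-- the single joined pattern both programs append for a matching pair (p before q)
def joinOne (flist : List Int) (p q : List Int) : List Int :=
  let l1 := PySem.List.pyGetD p (-1) 0
  let l2 := PySem.List.pyGetD q (-1) 0
  if PySem.List.pyGetD flist l1 0 ≥ PySem.List.pyGetD flist l2 0 then p ++ [l2] else q ++ [l1]

-- common reference: for each pattern, join it with every later pattern sharing its prefix
def pairsRef (flist : List Int) : List (List Int) → List (List Int)
  | [] => []
  | p :: rest =>
      ((rest.filter (fun q => decide (q.dropLast = p.dropLast))).map (joinOne flist p)) ++ pairsRef flist rest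

-- the slots B's first pass records, computed structurally
def slotsOf (d : PySem.Dict (List Int) (List (List Int))) :
    List (List Int) → List ((List Int) × Int)
  | [] => []
  | p :: rest => (p.dropLast, ((d.getD p.dropLast []).length : Int)) ::
      slotsOf (d.insert p.dropLast (d.getD p.dropLast [] ++ [p])) rest

theorem foldl_stepB_fst (l : List (List Int)) (d : PySem.Dict (List Int) (List (List Int)))
    (s : List ((List Int) × Int)) (k : List Int) :
    ((l.foldl stepB (d, s)).1).getD k [] =
      d.getD k [] ++ l.filter (fun q => decide (q.dropLast = k)) := by
  induction l generalizing d s with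
  | nil => simp
  | cons p rest ih =>
      simp only [List.foldl_cons, List.filter_cons]
      rw [ih]
      by_cases h : p.dropLast = k
      · subst h
        simp [stepB, PySem.List.slice_to_neg_one, PySem.Dict.getD_insert_self]
      · simp [stepB, PySem.List.slice_to_neg_one, PySem.Dict.getD_insert, h, Ne.symm h]

theorem foldl_stepB_snd (l : List (List Int)) (d : PySem.Dict (List Int) (List (List Int)))
    (s : List ((List Int) × Int)) :
    (l.foldl stepB (d, s)).2 = s ++ slotsOf d l := by
  induction l generalizing d s with
  | nil => simp [slotsOf]
  | cons p rest ih =>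
      simp only [List.foldl_cons, slotsOf]
      rw [ih]
      simp [stepB, PySem.List.slice_to_neg_one]

-- A's flatMap over index ranges equals pairsRef on the corresponding suffix
theorem flat_drop (flist : List Int) (patterns : List (List Int)) :
    ∀ (s : List (List Int)) (k : Nat), patterns.drop k = s →
    (PySem.List.pyRange (k : Int) (patterns.length : Int) 1).flatMap
      (fun i =>
        ((patterns.drop (i + 1).toNat).filter
            (fun q => decide (q.dropLast = (PySem.List.pyGetD patterns i []).dropLast))).map
          (joinOne flist (PySem.List.pyGetD patterns i [])))
      = pairsRef flist s := by
  intro s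
  induction s with
  | nil =>
      intro k hk
      rw [PySem.List.pyRange_one_eq_nil (by
        have := List.drop_eq_nil_iff.mp hk
        omega)]
      simp [pairsRef]
  | cons p rest ih =>
      intro k hk
      have hklt : k < patterns.length := by
        by_contra h
        rw [List.drop_eq_nil_of_le (by omega)] at hk
        simp at hk
      have hget : patterns.getD k [] = p := by
        have h0 : (patterns.drop k).getD 0 [] = p := by rw [hk]; rfl
        simpa [List.getD, List.getElem?_drop] using h0
      have hdrop : patterns.drop (k + 1) = rest := by
        have : (patterns.drop k).tail = rest := by rw [hk]; rfl
        simpa [List.tail_drop] using this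
      rw [PySem.List.pyRange_one_cons (by exact_mod_cast hklt)]
      rw [List.flatMap_cons]
      have hcast : ((k : Int) + 1) = ((k + 1 : Nat) : Int) := by push_cast; ring
      rw [hcast, ih (k + 1) hdrop]
      simp only [pairsRef]
      congr 1
      rw [PySem.List.pyGetD_natCast, hget]
      have : ((k + 1 : Nat) : Int).toNat = k + 1 := by omega
      rw [this, hdrop]

theorem filter_map_idx (l : List Int) (get : Int → List Int) (p : List Int → Bool)
    (F : List Int → List Int) :
    (l.filter (fun j => p (get j))).map (fun j => F (get j)) = ((l.map get).filter p).map F := by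
  rw [List.filter_map, List.map_map]; rfl

theorem self_join_eq_ref (patterns : List (List Int)) (flist : List Int) :
    self_join patterns flist = pairsRef flist patterns := by
  unfold self_join
  refine Eq.trans (PySem.List.foldl_congr_mem' _ _
    (fun (acc : List (List Int)) (i : Int) => acc ++
      ((patterns.drop (i + 1).toNat).filter
          (fun q => decide (q.dropLast = (PySem.List.pyGetD patterns i []).dropLast))).map
        (joinOne flist (PySem.List.pyGetD patterns i []))) _ ?_) ?_
  · intro i hi acc
    have hi0 : 0 ≤ i := (PySem.List.mem_pyRange_one.mp hi).1
    refine Eq.trans (PySem.List.foldl_congr_mem' _ _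
      (fun (acc : List (List Int)) (j : Int) =>
        if (PySem.List.pyGetD patterns i []).dropLast
            = (PySem.List.pyGetD patterns j []).dropLast then
          acc ++ [joinOne flist (PySem.List.pyGetD patterns i []) (PySem.List.pyGetD patterns j [])]
        else acc) _ ?_) ?_
    · intro j hj acc
      simp only [PySem.List.slice_to_neg_one, joinOne]
      split_ifs <;> rfl
    · rw [PySem.List.foldl_append_ite]
      congr 1
      rw [filter_map_idx _ (fun j => PySem.List.pyGetD patterns j [])
            (fun q => decide ((PySem.List.pyGetD patterns i []).dropLast = q.dropLast))
            (joinOne flist (PySem.List.pyGetD patterns i []))]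
      rw [PySem.List.map_pyGetD_pyRange' patterns [] (by omega)]
      exact congrArg _ (List.filter_congr (fun q _ => decide_eq_decide.mpr eq_comm))
  · rw [PySem.List.foldl_append_eq_flatMap]
    simpa using flat_drop flist patterns patterns 0 (by simp)

theorem drop_len_succ {α : Type} (A : List α) (x : α) (B : List α) :
    List.drop (A.length + 1) (A ++ x :: B) = B := by
  induction A with
  | nil => rfl
  | cons a t ih => simp [ih]

-- B's flatMap over the annotated patterns equals pairsRef
theorem flat_slots (flist : List Int)
    (bk : PySem.Dict (List Int) (List (List Int))) :
    ∀ (todo done : List (List Int)) (d : PySem.Dict (List Int) (List (List Int))),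
    (∀ c, d.getD c [] = done.filter (fun q => decide (q.dropLast = c))) →
    (∀ c, bk.getD c [] = (done ++ todo).filter (fun q => decide (q.dropLast = c))) →
    ((todo.zip (slotsOf d todo)).flatMap
      (fun pk => (PySem.List.slice (bk.getD pk.2.1 []) (some (pk.2.2 + 1)) none).map
        (joinOne flist pk.1)))
      = pairsRef flist todo := by
  intro todo
  induction todo with
  | nil => intro done d _ _; simp [slotsOf, pairsRef]
  | cons p rest ih =>
      intro done d hd hbk
      simp only [slotsOf, List.zip_cons_cons, List.flatMap_cons, pairsRef]
      congr 1
      · -- head piece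
        rw [hbk p.dropLast]
        have hsplit : (done ++ p :: rest).filter (fun q => decide (q.dropLast = p.dropLast))
            = done.filter (fun q => decide (q.dropLast = p.dropLast)) ++
              p :: rest.filter (fun q => decide (q.dropLast = p.dropLast)) := by
          simp [List.filter_append]
        rw [hsplit]
        have h01 : (0 : Int) ≤ ((d.getD p.dropLast []).length : Int) + 1 := by omega
        rw [PySem.List.slice_from _ h01]
        have hlen : (((d.getD p.dropLast []).length : Int) + 1).toNat
            = (done.filter (fun q => decide (q.dropLast = p.dropLast))).length + 1 := by
          rw [hd]; omega
        rw [hlen, drop_len_succ]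
      · -- tail piece
        apply ih (done ++ [p])
        · intro c
          by_cases h : p.dropLast = c
          · subst h
            simp [PySem.Dict.getD_insert_self, hd, List.filter_append]
          · simp [PySem.Dict.getD_insert, h, hd, List.filter_append, Ne.symm h]
        · intro c
          have := hbk c
          simpa using this

theorem self_join_alt_eq_ref (patterns : List (List Int)) (flist : List Int) :
    self_join_alt patterns flist = pairsRef flist patterns := by
  simp only [self_join_alt]
  rw [foldl_stepB_snd, List.nil_append]
  refine Eq.trans (PySem.List.foldl_congr_mem' _ _
    (fun (out : List (List Int)) (pk : List Int × (List Int × Int)) => out ++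
      (PySem.List.slice (((patterns.foldl stepB (PySem.Dict.empty, [])).1).getD pk.2.1 [])
        (some (pk.2.2 + 1)) none).map (joinOne flist pk.1)) _ ?_) ?_
  · intro pk hpk out
    refine Eq.trans (PySem.List.foldl_congr_mem' _ _
      (fun (out : List (List Int)) (q : List Int) => out ++ [joinOne flist pk.1 q]) _ ?_) ?_
    · intro q hq out
      simp only [joinOne]
      split_ifs <;> rfl
    · rw [PySem.List.foldl_append_singleton_eq_map]
  · rw [PySem.List.foldl_append_eq_flatMap, List.nil_append]
    refine flat_slots flist _ patterns [] PySem.Dict.empty ?_ ?_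
    · intro c; simp
    · intro c; rw [foldl_stepB_fst]; simp

-- ===== VERDICT (by name: the statement is the Claim_ definition above) =====
theorem self_join_spec : Claim_equal_self_join := by
  intro patterns flist _ _
  unfold Spec_self_join
  rw [self_join_eq_ref, self_join_alt_eq_ref]
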